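-- pv_equiv track=rewrite | github.com/thuan00/uet-qa | src/uetqa/util.py | find_rank
-- ===== SOURCE A (Python) =====
-- def find_rank(retrieved_context_ids, ground_truth_context_ids):
--     """ return best_rank if retrieval succeed, else return 0
--     """
--     success = False
--     best_rank = float('infinity')
--
--     for gt in ground_truth_context_ids:
--         try:
--             rank = retrieved_context_ids.index(gt) + 1
--             if rank < best_rank:
--                 best_rank = rank
--                 success = True
--         except:
--             pass
--
--     return best_rank if success else 0
-- ===== SOURCE B (Python) =====
-- def find_rank(retrieved_context_ids, ground_truth_context_ids):
--     """ return best_rank if retrieval succeed, else return 0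
--     """
--     gt = set(ground_truth_context_ids)
--     for i, x in enumerate(retrieved_context_ids):
--         if x in gt:
--             return i + 1
--     return 0
-- ===== Notes on version B (the rewrite author's own statement) =====
-- stated objective: simpler
-- what changed: Replaces the loop over ground-truth ids with repeated list.index scans and a best-rank accumulator by one forward pass over the retrieved list, returning the first position whose element lies in a prebuilt ground-truth set.
import Mathlib
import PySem

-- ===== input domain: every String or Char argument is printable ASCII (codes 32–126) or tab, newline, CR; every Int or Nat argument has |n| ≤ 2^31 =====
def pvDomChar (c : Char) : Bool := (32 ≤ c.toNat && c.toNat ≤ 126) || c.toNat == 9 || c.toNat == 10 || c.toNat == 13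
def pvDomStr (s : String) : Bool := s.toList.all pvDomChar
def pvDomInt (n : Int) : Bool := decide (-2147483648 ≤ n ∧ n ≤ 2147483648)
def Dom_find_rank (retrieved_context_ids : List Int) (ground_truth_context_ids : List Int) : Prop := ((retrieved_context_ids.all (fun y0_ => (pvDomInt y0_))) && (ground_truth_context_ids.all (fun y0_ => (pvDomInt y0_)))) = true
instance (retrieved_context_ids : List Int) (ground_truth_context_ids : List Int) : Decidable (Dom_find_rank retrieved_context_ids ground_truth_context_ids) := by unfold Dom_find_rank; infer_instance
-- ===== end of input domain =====

-- B replaces A's per-ground-truth-id .index scans and best-rank accumulator by a single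
-- forward pass over the retrieved list against a prebuilt ground-truth set (objective: simpler).

-- ===== PORT A =====
-- loop body: try rank = retrieved.index(gt)+1; if rank < best_rank: update; except: pass.
-- State is (success, best_rank). Initially best_rank = float('infinity'): while success is
-- still False the comparison 'rank < best_rank' is always true, so the state carries an Int
-- best_rank that is only meaningful (and only compared) once success is True.
def find_rank_step (retrieved : List Int) (st : Bool × Int) (gt : Int) : Bool × Int :=
  match PySem.List.index? retrieved gt with
  | none => st  -- ValueError: except: pass
  | some i =>
    let rank : Int := (i : Int) + 1
    if st.1 then (if rank < st.2 then (true, rank) else st) else (true, rank)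

def find_rank (retrieved_context_ids : List Int) (ground_truth_context_ids : List Int) : Int :=
  let st := ground_truth_context_ids.foldl (find_rank_step retrieved_context_ids) (false, 0)
  if st.1 then st.2 else 0

-- ===== PORT B =====
-- for i, x in enumerate(retrieved): if x in gt: return i + 1;  return 0  (i carried 1-based)
def find_rank_alt_go (gt : PySem.Set Int) (i : Int) : List Int → Int
  | [] => 0
  | x :: rest => if gt.contains x then i else find_rank_alt_go gt (i + 1) rest

def find_rank_alt (retrieved_context_ids : List Int) (ground_truth_context_ids : List Int) : Int :=
  let gt := PySem.Set.ofList ground_truth_context_ids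
  find_rank_alt_go gt 1 retrieved_context_ids

-- ===== PRECONDITION & SPEC =====
def Spec_find_rank (retrieved_context_ids : List Int) (ground_truth_context_ids : List Int) (out : Int) : Prop := out = find_rank_alt retrieved_context_ids ground_truth_context_ids
instance (retrieved_context_ids : List Int) (ground_truth_context_ids : List Int) (out : Int) : Decidable (Spec_find_rank retrieved_context_ids ground_truth_context_ids out) := by unfold Spec_find_rank; infer_instance

-- ===== CLAIM (what is proved, stated in full; the proofs are below) =====
def Claim_equal_find_rank : Prop := ∀ (retrieved_context_ids : List Int) (ground_truth_context_ids : List Int), Dom_find_rank retrieved_context_ids ground_truth_context_ids → Spec_find_rank retrieved_context_ids ground_truth_context_ids (find_rank retrieved_context_ids ground_truth_context_ids)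

-- ===== LEMMAS AND PROOFS =====

-- First index in r of an element of g (shared characterization of both ports).
def pvF (r g : List Int) : Option Nat := r.findIdx? (fun x => decide (x ∈ g))

-- shift a 0-based first index to a 1-based rank
def pvSc : Option Nat → Option Int
  | none => none
  | some j => some ((j : Int) + 1)

-- rank contributed by one ground-truth id in A
def pvRank (r : List Int) (gt : Int) : Option Int := pvSc (PySem.List.index? r gt)

-- A's best-rank combiner as a min on Option Int (none = no hit yet)
def pvOmin : Option Int → Option Int → Option Int
  | none, b => b
  | some a, none => some a
  | some a, some b => if b < a then some b else some a

def pvEncode : Option Int → Bool × Int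
  | none => (false, 0)
  | some m => (true, m)

theorem pvRank_pos (r : List Int) (gt : Int) (m : Int) (h : pvRank r gt = some m) :
    1 ≤ m := by
  cases h' : PySem.List.index? r gt with
  | none => rw [pvRank, h'] at h; exact absurd h (by simp [pvSc])
  | some i =>
    rw [pvRank, h'] at h
    simp only [pvSc, Option.some.injEq] at h
    omega

theorem pvRank_cons_self (x : Int) (r : List Int) : pvRank (x :: r) x = some 1 := by
  rw [pvRank, PySem.List.index?_cons_self]
  norm_num [pvSc]

theorem pvRank_cons_ne (x gt : Int) (r : List Int) (hx : x ≠ gt) :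
    pvRank (x :: r) gt = (pvRank r gt).map (· + 1) := by
  rw [pvRank, pvRank, PySem.List.index?_cons_of_ne r hx]
  cases PySem.List.index? r gt with
  | none => rfl
  | some i =>
    simp only [pvSc, Option.map_some, Option.some.injEq]
    push_cast; ring

theorem pvF_cons_mem (x : Int) (r g : List Int) (hg : x ∈ g) :
    pvF (x :: r) g = some 0 := by
  rw [pvF, List.findIdx?_cons, if_pos (by simpa using hg)]

theorem pvF_cons_not_mem (x : Int) (r g : List Int) (hg : x ∉ g) :
    pvF (x :: r) g = (pvF r g).map (· + 1) := by
  rw [pvF, pvF, List.findIdx?_cons, if_neg (by simpa using hg)]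

theorem pvStep_encode (r : List Int) (o : Option Int) (gt : Int) :
    find_rank_step r (pvEncode o) gt = pvEncode (pvOmin o (pvRank r gt)) := by
  unfold find_rank_step
  cases h : PySem.List.index? r gt with
  | none =>
    have hr : pvRank r gt = none := by rw [pvRank, h]; rfl
    cases o <;> simp only [hr] <;> rfl
  | some i =>
    have hr : pvRank r gt = some ((i : Int) + 1) := by
      rw [pvRank, h]; rfl
    cases o with
    | none => simp only [hr]; rfl
    | some b =>
      simp only [hr, pvEncode, pvOmin]
      split_ifs <;> rfl

theorem pvSc_map (o : Option Nat) : pvSc (o.map (· + 1)) = (pvSc o).map (· + 1) := by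
  cases o with
  | none => rfl
  | some j =>
    simp only [Option.map_some, pvSc, Option.some.injEq]
    push_cast; ring

theorem pvOmin_map (a b : Option Int) :
    pvOmin (a.map (· + 1)) (b.map (· + 1)) = (pvOmin a b).map (· + 1) := by
  cases a <;> cases b <;>
    simp only [Option.map_some, Option.map_none, pvOmin] <;>
    split_ifs <;> first | rfl | omega

theorem pvFoldl_encode (r g : List Int) (o : Option Int) :
    g.foldl (find_rank_step r) (pvEncode o) =
      pvEncode (g.foldl (fun o gt => pvOmin o (pvRank r gt)) o) := by
  induction g generalizing o with
  | nil => rfl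
  | cons gt gs ih => rw [List.foldl_cons, List.foldl_cons, pvStep_encode, ih]

theorem pvOmin_assoc (a b c : Option Int) :
    pvOmin (pvOmin a b) c = pvOmin a (pvOmin b c) := by
  cases a <;> cases b <;> cases c <;> simp only [pvOmin] <;> split_ifs <;>
    simp only [pvOmin] <;> split_ifs <;>
    first | rfl | (simp only [Option.some.injEq]; omega)

theorem pvFoldl_omin (r : List Int) (g : List Int) (o : Option Int) :
    g.foldl (fun o gt => pvOmin o (pvRank r gt)) o =
      pvOmin o (g.foldl (fun o gt => pvOmin o (pvRank r gt)) none) := by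
  induction g generalizing o with
  | nil => cases o <;> rfl
  | cons gt gs ih =>
    rw [List.foldl_cons, List.foldl_cons, ih, ih (pvOmin none (pvRank r gt))]
    have h0 : pvOmin none (pvRank r gt) = pvRank r gt := rfl
    rw [h0, ← pvOmin_assoc]

-- key: the minimum of (rank of gt in r) and (first rank of an element of g in r)
-- is the first rank of an element of gt::g in r.
theorem pvKey (r : List Int) (gt : Int) (g : List Int) :
    pvOmin (pvRank r gt) (pvSc (pvF r g)) = pvSc (pvF r (gt :: g)) := by
  induction r with
  | nil => rfl
  | cons x r ih =>
    by_cases hx : x = gt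
    · subst hx
      rw [pvRank_cons_self, pvF_cons_mem x r (x :: g) (List.mem_cons_self),
        pvSc]
      cases h : pvF (x :: r) g with
      | none => rfl
      | some j =>
        simp only [pvSc, pvOmin]
        rw [if_neg (by omega)]
        norm_num
    · rw [pvRank_cons_ne x gt r hx]
      by_cases hg : x ∈ g
      · rw [pvF_cons_mem x r g hg, pvF_cons_mem x r (gt :: g) (List.mem_cons_of_mem _ hg)]
        cases h : pvRank r gt with
        | none => rfl
        | some m =>
          have hm := pvRank_pos r gt m h
          simp only [Option.map_some, pvSc, pvOmin, Nat.cast_zero]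
          rw [if_pos (by omega)]
      · rw [pvF_cons_not_mem x r g hg,
          pvF_cons_not_mem x r (gt :: g) (by simp [hx, hg])]
        rw [pvSc_map, pvSc_map, pvOmin_map, ih]

theorem pvM_eq_F (r g : List Int) :
    g.foldl (fun o gt => pvOmin o (pvRank r gt)) none = pvSc (pvF r g) := by
  induction g with
  | nil =>
    have : pvF r [] = none := by
      simp [pvF, List.findIdx?_eq_none_iff]
    rw [List.foldl_nil, this]; rfl
  | cons gt gs ih =>
    rw [List.foldl_cons, pvFoldl_omin, ih]
    have h0 : pvOmin none (pvRank r gt) = pvRank r gt := rfl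
    rw [h0, pvKey]

theorem pvGo_eq (g : List Int) (r : List Int) (i : Int) :
    find_rank_alt_go (PySem.Set.ofList g) i r =
      (match pvF r g with
       | some j => i + (j : Int)
       | none => 0) := by
  induction r generalizing i with
  | nil => rfl
  | cons x r ih =>
    by_cases hg : x ∈ g
    · have hc : (PySem.Set.ofList g).contains x = true := by
        rw [PySem.Set.contains_iff, PySem.Set.mem_ofList]; exact hg
      rw [find_rank_alt_go, hc, if_pos rfl, pvF_cons_mem x r g hg]
      norm_num
    · have hc : (PySem.Set.ofList g).contains x = false := by
        simp [PySem.Set.mem_ofList, hg]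
      rw [find_rank_alt_go, hc, if_neg (by simp), ih, pvF_cons_not_mem x r g hg]
      cases pvF r g with
      | none => rfl
      | some j =>
        simp only [Option.map_some]
        push_cast; ring

-- ===== VERDICT (by name: the statement is the Claim_ definition above) =====
theorem find_rank_spec : Claim_equal_find_rank := by
  intro r g _
  unfold Spec_find_rank find_rank find_rank_alt
  have hA := pvFoldl_encode r g none
  rw [show pvEncode none = (false, 0) from rfl] at hA
  rw [hA, pvM_eq_F, pvGo_eq g r 1]
  cases pvF r g with
  | none => rfl
  | some j =>
    simp only [pvSc, pvEncode]
    norm_num; ring
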